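-- pv_equiv track=rewrite | github.com/abhibp1993/prefltlf2pdfa | prefltlf2pdfa/semantics.py | semantics_exists_forall
-- ===== SOURCE A (Python) =====
-- def semantics_exists_forall(preorder, source, target):
--     """
--     Check if there exists a formula in the source set such that all formulas
--     in the target set satisfy the given preorder.
--
--     Args:
--         preorder (list of tuple): The preorder defining the preference relation.
--         source (list): List of binary values representing the source formulas.
--         target (list): List of binary values representing the target formulas.
--
--     Returns:
--         bool: True if the semantic condition is satisfied, False otherwise.
--     """
--     sat_source = {i for i in range(len(source)) if source[i] == 1}
--     sat_target = {i for i in range(len(target)) if target[i] == 1}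
--
--     # Force empty set to be indifferent to each other. Required for preference graph to be preorder.
--     if sat_source == sat_target == set():
--         return True
--
--     if sat_target == set():
--         return False
--
--     for alpha_from in sat_source:
--         if not any((alpha_to, alpha_from) in preorder for alpha_to in sat_target):
--             return False
--
--     return True
-- ===== SOURCE B (Python) =====
-- def semantics_exists_forall(preorder, source, target):
--     covered = {b for (a, b) in preorder
--                if 0 <= a < len(target) and target[a] == 1}
--     return all(i in covered for i, v in enumerate(source) if v == 1)
-- ===== Notes on version B (the rewrite author's own statement) =====
-- stated objective: alternative
-- what changed: Replaced A's two index-set comprehensions, empty-set guards and per-source rescan of the preorder with a single pass over the preorder that builds the set of covered source indices (testing target[a]==1 directly with a bounds check) followed by one all() over enumerate(source); the guards are subsumed by the uniform coverage test.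
import Mathlib
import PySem

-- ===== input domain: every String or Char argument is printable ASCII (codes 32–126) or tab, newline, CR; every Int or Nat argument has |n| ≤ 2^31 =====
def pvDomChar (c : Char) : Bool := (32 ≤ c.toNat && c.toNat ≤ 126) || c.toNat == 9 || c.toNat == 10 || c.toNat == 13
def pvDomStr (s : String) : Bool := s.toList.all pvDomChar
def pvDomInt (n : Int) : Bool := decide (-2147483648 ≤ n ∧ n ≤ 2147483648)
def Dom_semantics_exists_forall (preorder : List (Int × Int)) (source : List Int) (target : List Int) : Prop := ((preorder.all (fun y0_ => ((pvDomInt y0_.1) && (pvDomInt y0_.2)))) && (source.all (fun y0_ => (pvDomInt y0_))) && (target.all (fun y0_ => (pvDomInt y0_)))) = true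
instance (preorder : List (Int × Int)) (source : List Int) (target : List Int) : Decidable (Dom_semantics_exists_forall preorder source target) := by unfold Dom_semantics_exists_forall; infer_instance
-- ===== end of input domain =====

-- B builds the set of covered source indices in one pass over the preorder (indexing
-- target directly under a bounds check) and checks every 1-entry of enumerate(source)
-- is covered; this subsumes A's empty-set guards (objective: alternative).

-- ===== PORT A =====
-- for-loop with early `return False` and final `return True` is transliterated as all/any;
-- the sets are consumed order-independently, which PySem.Set models exactly.
def semantics_exists_forall (preorder : List (Int × Int)) (source : List Int) (target : List Int) : Bool :=
  let sat_source : PySem.Set Int :=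
    PySem.Set.ofList ((PySem.List.pyRange 0 source.length 1).filter
      (fun i => PySem.List.pyGetD source i 0 == 1))
  let sat_target : PySem.Set Int :=
    PySem.Set.ofList ((PySem.List.pyRange 0 target.length 1).filter
      (fun i => PySem.List.pyGetD target i 0 == 1))
  if PySem.Set.equal sat_source [] && PySem.Set.equal sat_target [] then true
  else if PySem.Set.equal sat_target [] then false
  else
    sat_source.all (fun alpha_from =>
      sat_target.any (fun alpha_to => preorder.contains (alpha_to, alpha_from)))

-- ===== PORT B =====
-- set comprehension over preorder with a chained bounds check, then all() over enumerate
def semantics_exists_forall_alt (preorder : List (Int × Int)) (source : List Int) (target : List Int) : Bool :=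
  let covered : PySem.Set Int :=
    PySem.Set.ofList (preorder.filterMap (fun p =>
      if 0 ≤ p.1 ∧ p.1 < (target.length : Int) ∧ PySem.List.pyGetD target p.1 0 = 1
      then some p.2 else none))
  ((PySem.List.enumerate source).filter (fun q => q.2 == 1)).all
    (fun q => PySem.Set.contains covered q.1)

-- ===== PRECONDITION & SPEC =====
def Spec_semantics_exists_forall (preorder : List (Int × Int)) (source : List Int) (target : List Int) (out : Bool) : Prop := out = semantics_exists_forall_alt preorder source target
instance (preorder : List (Int × Int)) (source : List Int) (target : List Int) (out : Bool) : Decidable (Spec_semantics_exists_forall preorder source target out) := by unfold Spec_semantics_exists_forall; infer_instance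

-- ===== CLAIM =====
def Claim_equal_semantics_exists_forall : Prop := ∀ (preorder : List (Int × Int)) (source : List Int) (target : List Int), Dom_semantics_exists_forall preorder source target → Spec_semantics_exists_forall preorder source target (semantics_exists_forall preorder source target)

-- ===== LEMMAS AND PROOFS =====

-- "index i is a satisfied index of xs"
def pvSat (xs : List Int) (i : Int) : Prop :=
  0 ≤ i ∧ i < (xs.length : Int) ∧ PySem.List.pyGetD xs i 0 = 1

-- the shared characterizing proposition
def pvP (preorder : List (Int × Int)) (source target : List Int) : Prop :=
  ∀ i : Int, pvSat source i → ∃ a : Int, pvSat target a ∧ (a, i) ∈ preorder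

-- membership in A's comprehension sets
lemma mem_satSet (xs : List Int) (x : Int) :
    x ∈ PySem.Set.ofList ((PySem.List.pyRange 0 xs.length 1).filter
        (fun i => PySem.List.pyGetD xs i 0 == 1)) ↔ pvSat xs x := by
  rw [PySem.Set.mem_ofList, List.mem_filter, PySem.List.mem_pyRange_one]
  simp [pvSat, and_assoc]

-- membership in B's covered set
lemma mem_covered (pre : List (Int × Int)) (target : List Int) (x : Int) :
    x ∈ PySem.Set.ofList (pre.filterMap (fun p =>
        if 0 ≤ p.1 ∧ p.1 < (target.length : Int) ∧ PySem.List.pyGetD target p.1 0 = 1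
        then some p.2 else none))
      ↔ ∃ a : Int, pvSat target a ∧ (a, x) ∈ pre := by
  rw [PySem.Set.mem_ofList, List.mem_filterMap]
  constructor
  · rintro ⟨⟨a, b⟩, hp, h⟩
    by_cases hc : 0 ≤ a ∧ a < (target.length : Int) ∧ PySem.List.pyGetD target a 0 = 1
    · rw [if_pos hc] at h
      obtain rfl : b = x := Option.some_inj.mp h
      exact ⟨a, hc, hp⟩
    · rw [if_neg hc] at h; exact absurd h (by simp)
  · rintro ⟨a, ha, hp⟩
    obtain ⟨h1, h2, h3⟩ := ha
    exact ⟨(a, x), hp, by simp [h1, h2, h3]⟩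

-- A computes pvP
lemma portA_iff (pre : List (Int × Int)) (source target : List Int) :
    semantics_exists_forall pre source target = true ↔ pvP pre source target := by
  unfold semantics_exists_forall
  set S := PySem.Set.ofList ((PySem.List.pyRange 0 source.length 1).filter
      (fun i => PySem.List.pyGetD source i 0 == 1)) with hS
  set T := PySem.Set.ofList ((PySem.List.pyRange 0 target.length 1).filter
      (fun i => PySem.List.pyGetD target i 0 == 1)) with hT
  by_cases hTe : ∀ x : Int, ¬ pvSat target x
  · have hTb : PySem.Set.equal T [] = true := by
      rw [PySem.Set.equal_iff]; intro x
      simp [hT]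
      intro h1 h2 h3
      exact hTe x ⟨h1, h2, h3⟩
    by_cases hSe : ∀ x : Int, ¬ pvSat source x
    · have hSb : PySem.Set.equal S [] = true := by
        rw [PySem.Set.equal_iff]; intro x
        simp [hS]
        intro h1 h2 h3
        exact hSe x ⟨h1, h2, h3⟩
      simp only [hSb, hTb, Bool.and_self, if_true]
      constructor
      · intro _ i hi; exact absurd hi (hSe i)
      · intro _; trivial
    · push Not at hSe; obtain ⟨x, hx⟩ := hSe
      have hSb : PySem.Set.equal S [] = false := by
        rw [Bool.eq_false_iff]; intro h
        have := ((PySem.Set.equal_iff S []).mp h x).mp ((mem_satSet source x).mpr hx)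
        simp at this
      simp only [hSb, hTb, Bool.false_and, Bool.false_eq_true, if_false, if_true]
      constructor
      · intro h; cases h
      · intro hp
        obtain ⟨a, ha, -⟩ := hp x hx
        exact absurd ha (hTe a)
  · push Not at hTe; obtain ⟨y, hy⟩ := hTe
    have hTb : PySem.Set.equal T [] = false := by
      rw [Bool.eq_false_iff]; intro h
      have := ((PySem.Set.equal_iff T []).mp h y).mp ((mem_satSet target y).mpr hy)
      simp at this
    simp only [hTb, Bool.and_false, Bool.false_eq_true, if_false]
    rw [List.all_eq_true]
    constructor
    · intro h i hi
      have := h i ((mem_satSet source i).mpr hi)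
      obtain ⟨a, haT, hmem⟩ := by simpa [List.any_eq_true] using this
      exact ⟨a, (mem_satSet target a).mp haT, by simpa using hmem⟩
    · intro hp x hxS
      obtain ⟨a, ha, hmem⟩ := hp x ((mem_satSet source x).mp hxS)
      simp only [List.any_eq_true]
      exact ⟨a, (mem_satSet target a).mpr ha, by simpa using hmem⟩

-- B computes pvP
lemma portB_iff (pre : List (Int × Int)) (source target : List Int) :
    semantics_exists_forall_alt pre source target = true ↔ pvP pre source target := by
  unfold semantics_exists_forall_alt
  rw [List.all_eq_true]
  constructor
  · intro h i hi
    obtain ⟨hi0, hilen, hi1⟩ := hi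
    have hklen : i.toNat < source.length := by omega
    have hqmem : (i, source[i.toNat]) ∈ PySem.List.enumerate source := by
      rw [PySem.List.mem_enumerate_iff]
      exact ⟨i.toNat, hklen, by simp; omega⟩
    have hval : source[i.toNat] = 1 := by
      rwa [PySem.List.pyGetD_eq_getElem source 0 hi0 hilen] at hi1
    have := h (i, source[i.toNat]) (by rw [List.mem_filter]; exact ⟨hqmem, by simp [hval]⟩)
    have hc := (PySem.Set.contains_iff _ _).mp this
    exact (mem_covered pre target i).mp hc
  · intro hp q hq
    rw [List.mem_filter] at hq
    obtain ⟨hqe, hq1⟩ := hq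
    rw [PySem.List.mem_enumerate_iff] at hqe
    obtain ⟨k, hk, rfl⟩ := hqe
    have hq1' : source[k] = 1 := by simpa using hq1
    have hsat : pvSat source ((0 : Int) + k) := by
      refine ⟨by omega, by omega, ?_⟩
      have : ((0 : Int) + k) = (k : Int) := by omega
      rw [this, PySem.List.pyGetD_natCast]
      simp [List.getD, hk, hq1']
    exact (PySem.Set.contains_iff _ _).mpr
      ((mem_covered pre target _).mpr (hp _ hsat))

-- ===== VERDICT =====
theorem semantics_exists_forall_spec : Claim_equal_semantics_exists_forall := by
  intro preorder source target _
  unfold Spec_semantics_exists_forall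
  have hA := portA_iff preorder source target
  have hB := portB_iff preorder source target
  cases hA' : semantics_exists_forall preorder source target <;>
    cases hB' : semantics_exists_forall_alt preorder source target
  · rfl
  · exact absurd (hA.mpr (hB.mp hB')) (by simp [hA'])
  · exact absurd (hB.mpr (hA.mp hA')) (by simp [hB'])
  · rfl
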